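-- pv_equiv track=rewrite | github.com/Michael-huo/ExpHub | scripts/_segment/policies/risk.py | _safe_snap_map
-- ===== SOURCE A (Python) =====
-- def _safe_snap_map(safe_snapped_pairs):
--     mapping = {}
--     for item in list(safe_snapped_pairs or []):
--         teacher_idx = int(item.get("teacher_frame_idx", 0) or 0)
--         safe_idx = int(item.get("safe_frame_idx", 0) or 0)
--         candidate_key = (
--             0 if teacher_idx == safe_idx else 1,
--             abs(teacher_idx - safe_idx),
--             safe_idx,
--         )
--         current = mapping.get(teacher_idx)
--         if current is None or candidate_key < current["key"]:
--             mapping[teacher_idx] = {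
--                 "safe_frame_idx": int(safe_idx),
--                 "key": candidate_key,
--             }
--     out = {}
--     for teacher_idx, item in mapping.items():
--         out[int(teacher_idx)] = int(item["safe_frame_idx"])
--     return out
-- ===== SOURCE B (Python) =====
-- def _safe_snap_map(safe_snapped_pairs):
--     # group-then-reduce: bucket safe candidates per teacher, then pick each
--     # bucket's winner with a stable min over the same (eq, |diff|, safe) key
--     buckets = {}
--     for item in list(safe_snapped_pairs or []):
--         t = int(item.get("teacher_frame_idx", 0) or 0)
--         s = int(item.get("safe_frame_idx", 0) or 0)
--         buckets.setdefault(t, []).append(s)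
--     return {
--         t: min(ss, key=lambda s: (0 if t == s else 1, abs(t - s), s))
--         for t, ss in buckets.items()
--     }
-- ===== Notes on version B (the rewrite author's own statement) =====
-- stated objective: alternative
-- what changed: Replaces A's streaming per-teacher running-minimum dict (compare-and-overwrite on every item, then a second copy loop) by a group-then-reduce structure: one pass buckets the safe candidates per teacher, a second pass picks each bucket's winner with a stable min over the same (eq, |diff|, safe) key.
import Mathlib
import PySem

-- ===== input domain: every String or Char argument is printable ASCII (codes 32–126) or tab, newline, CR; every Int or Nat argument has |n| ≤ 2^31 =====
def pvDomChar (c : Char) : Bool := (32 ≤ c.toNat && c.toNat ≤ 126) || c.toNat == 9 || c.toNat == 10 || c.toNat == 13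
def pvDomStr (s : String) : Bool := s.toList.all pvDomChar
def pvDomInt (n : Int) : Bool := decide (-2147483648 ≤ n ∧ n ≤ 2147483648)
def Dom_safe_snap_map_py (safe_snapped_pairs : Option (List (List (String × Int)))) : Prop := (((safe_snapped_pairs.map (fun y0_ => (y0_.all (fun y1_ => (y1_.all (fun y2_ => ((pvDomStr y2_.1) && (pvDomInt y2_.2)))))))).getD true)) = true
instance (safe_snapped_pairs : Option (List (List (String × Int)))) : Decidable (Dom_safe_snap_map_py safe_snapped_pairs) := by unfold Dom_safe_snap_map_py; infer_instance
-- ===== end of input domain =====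

-- B replaces A's streaming per-teacher running minimum by a group-then-reduce pass
-- (bucket candidates per teacher, then a stable min per bucket); same cost, alternative structure.

-- ===== PORT A =====
-- candidate key (0 if teacher == safe else 1, abs(teacher - safe), safe); shared by both ports
def pvKey (t s : Int) : Int × Int × Int := (if t = s then 0 else 1, |t - s|, s)

-- Python tuple '<' (lexicographic) on the 3-tuple keys; shared by both ports
def pvKeyLt (x y : Int × Int × Int) : Bool :=
  decide (x.1 < y.1 ∨ (x.1 = y.1 ∧ (x.2.1 < y.2.1 ∨ (x.2.1 = y.2.1 ∧ x.2.2 < y.2.2))))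

-- loop body of A's first loop: keep per teacher the (safe, key) with the smallest key seen so far
def pvStepA (m : PySem.Dict Int (Int × (Int × Int × Int))) (item : List (String × Int)) :
    PySem.Dict Int (Int × (Int × Int × Int)) :=
  let t := (PySem.Dict.mk item).getD "teacher_frame_idx" 0
  let s := (PySem.Dict.mk item).getD "safe_frame_idx" 0
  let ck := pvKey t s
  match m.get? t with
  | none => m.insert t (s, ck)
  | some cur => if pvKeyLt ck cur.2 then m.insert t (s, ck) else m

def safe_snap_map_py (safe_snapped_pairs : Option (List (List (String × Int)))) : List (Int × Int) :=
  let mapping := (safe_snapped_pairs.getD []).foldl pvStepA PySem.Dict.empty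
  -- second loop: out[int(teacher)] = int(item["safe_frame_idx"])
  let out : PySem.Dict Int Int :=
    mapping.items.foldl (fun d p => d.insert p.1 p.2.1) PySem.Dict.empty
  out.items

-- ===== PORT B =====
-- loop body of B's bucketing pass: buckets.setdefault(t, []).append(s)
def pvStepB (d : PySem.Dict Int (List Int)) (item : List (String × Int)) :
    PySem.Dict Int (List Int) :=
  let t := (PySem.Dict.mk item).getD "teacher_frame_idx" 0
  let s := (PySem.Dict.mk item).getD "safe_frame_idx" 0
  match d.get? t with
  | none => d.insert t [s]
  | some l => d.insert t (l ++ [s])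

-- Python's min(ss, key=...) for a bucket of teacher t: first element with strictly smallest key
def pvMinByKey (t : Int) : List Int → Option Int
  | [] => none
  | s :: rest =>
      some (rest.foldl (fun best s' => if pvKeyLt (pvKey t s') (pvKey t best) then s' else best) s)

def safe_snap_map_py_alt (safe_snapped_pairs : Option (List (List (String × Int)))) : List (Int × Int) :=
  let buckets := (safe_snapped_pairs.getD []).foldl pvStepB PySem.Dict.empty
  buckets.items.map (fun p => (p.1, (pvMinByKey p.1 p.2).getD 0))

-- ===== PRECONDITION & SPEC =====
def Spec_safe_snap_map_py (safe_snapped_pairs : Option (List (List (String × Int)))) (out : List (Int × Int)) : Prop := out = safe_snap_map_py_alt safe_snapped_pairs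
instance (safe_snapped_pairs : Option (List (List (String × Int)))) (out : List (Int × Int)) : Decidable (Spec_safe_snap_map_py safe_snapped_pairs out) := by unfold Spec_safe_snap_map_py; infer_instance

-- ===== CLAIM (what is proved, stated in full; the proofs are below) =====
def Claim_equal_safe_snap_map_py : Prop := ∀ (safe_snapped_pairs : Option (List (List (String × Int)))), Dom_safe_snap_map_py safe_snapped_pairs → Spec_safe_snap_map_py safe_snapped_pairs (safe_snap_map_py safe_snapped_pairs)

-- ===== LEMMAS AND PROOFS =====

-- the (safe, key) record A keeps for a teacher, computed from B's bucket for that teacher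
def pvVal (t : Int) (ss : List Int) : Int × (Int × Int × Int) :=
  match pvMinByKey t ss with
  | some b => (b, pvKey t b)
  | none => (0, pvKey t 0)

theorem pvVal_append (t : Int) (l : List Int) (s : Int) (hl : l ≠ []) :
    pvVal t (l ++ [s]) =
      if pvKeyLt (pvKey t s) (pvVal t l).2 then (s, pvKey t s) else pvVal t l := by
  cases l with
  | nil => exact absurd rfl hl
  | cons s0 rest =>
      simp [pvVal, pvMinByKey, List.foldl_append]
      by_cases h : pvKeyLt (pvKey t s)
          (pvKey t (rest.foldl (fun best s' => if pvKeyLt (pvKey t s') (pvKey t best) then s' else best) s0)) <;>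
        simp [h]

-- get? through a value-map of the items (keys unchanged)
theorem pv_get?_mk_map (l : List (Int × List Int)) (t : Int) :
    (PySem.Dict.mk (l.map (fun p => (p.1, pvVal p.1 p.2)))).get? t
      = ((PySem.Dict.mk l).get? t).map (fun ss => pvVal t ss) := by
  induction l with
  | nil => rfl
  | cons p rest ih =>
      rcases p with ⟨k, ss⟩
      by_cases hk : k = t
      · subst hk; simp [PySem.Dict.get?_mk_cons]
      · simp [PySem.Dict.get?_mk_cons, hk, ih]

-- one item preserves the simulation between A's mapping and B's buckets
theorem pv_step_invariant (m : PySem.Dict Int (Int × (Int × Int × Int)))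
    (d : PySem.Dict Int (List Int)) (item : List (String × Int))
    (h : m.items = d.items.map (fun p => (p.1, pvVal p.1 p.2)))
    (hne : ∀ p ∈ d.items, p.2 ≠ [])
    (hnd : d.keys.Nodup) :
    (pvStepA m item).items = (pvStepB d item).items.map (fun p => (p.1, pvVal p.1 p.2))
    ∧ (∀ p ∈ (pvStepB d item).items, p.2 ≠ [])
    ∧ (pvStepB d item).keys.Nodup := by
  set t := (PySem.Dict.mk item).getD "teacher_frame_idx" 0 with ht
  set s := (PySem.Dict.mk item).getD "safe_frame_idx" 0 with hs
  have hm : m = PySem.Dict.mk (d.items.map (fun p => (p.1, pvVal p.1 p.2))) := by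
    cases m; simpa using h
  have hget : m.get? t = (d.get? t).map (fun ss => pvVal t ss) := by
    rw [hm]
    have := pv_get?_mk_map d.items t
    cases d; simpa using this
  cases hd : d.get? t with
  | none =>
      have hcd : d.contains t = false := (PySem.Dict.get?_eq_none_iff_contains d t).mp hd
      have hcm : m.contains t = false := by
        rw [← PySem.Dict.get?_eq_none_iff_contains]
        rw [hget, hd]; rfl
      have hA : pvStepA m item = m.insert t (s, pvKey t s) := by
        simp [pvStepA, ← ht, ← hs, hget, hd]
      have hB : pvStepB d item = d.insert t [s] := by
        simp [pvStepB, ← ht, ← hs, hd]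
      refine ⟨?_, ?_, ?_⟩
      · rw [hA, hB, PySem.Dict.items_insert_of_not_contains m _ hcm,
          PySem.Dict.items_insert_of_not_contains d _ hcd, List.map_append, h]
        rfl
      · intro p hp
        rw [hB, PySem.Dict.items_insert_of_not_contains d _ hcd] at hp
        rcases List.mem_append.mp hp with h1 | h1
        · exact hne p h1
        · simp at h1; subst h1; simp
      · rw [hB, PySem.Dict.keys_insert_of_not_contains d _ hcd]
        refine List.nodup_append.mpr ⟨hnd, List.nodup_singleton t, ?_⟩
        intro a ha b hb
        simp only [List.mem_singleton] at hb
        subst hb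
        rintro rfl
        have hc : d.contains t = true := by
          rw [PySem.Dict.contains_eq_decide_mem_keys]; simp [ha]
        rw [hcd] at hc; exact Bool.false_ne_true hc
  | some l =>
      have hlmem : (t, l) ∈ d.items := PySem.Dict.mem_items_of_get?_eq_some d hd
      have hlne : l ≠ [] := hne _ hlmem
      have hcd : d.contains t = true := by
        by_contra hc
        have := (PySem.Dict.get?_eq_none_iff_contains d t).mpr (by
          cases hcv : d.contains t
          · rfl
          · exact absurd hcv hc)
        rw [hd] at this; exact Option.some_ne_none _ this
      have hcm : m.contains t = true := by
        by_contra hc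
        have hcm' : m.contains t = false := by
          cases hcv : m.contains t
          · rfl
          · exact absurd hcv hc
        have := (PySem.Dict.get?_eq_none_iff_contains m t).mpr hcm'
        rw [hget, hd] at this
        exact Option.some_ne_none _ this
      have hB : pvStepB d item = d.insert t (l ++ [s]) := by
        simp [pvStepB, ← ht, ← hs, hd]
      have hBitems : (pvStepB d item).items
          = d.items.map (fun p => if p.1 == t then (t, l ++ [s]) else p) := by
        rw [hB, PySem.Dict.items_insert_of_contains d _ hcd]
      have hBkeys : (pvStepB d item).keys = d.keys := by
        unfold PySem.Dict.keys
        rw [hBitems, List.map_map]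
        apply List.map_congr_left
        intro p _
        by_cases hp : p.1 = t <;> simp [hp]
      refine ⟨?_, ?_, ?_⟩
      · have hval : ∀ p ∈ d.items, p.1 = t → p.2 = l := by
          intro p hp hpt
          have : d.get? p.1 = some p.2 := by
            apply PySem.Dict.get?_of_mem_items d _ hnd
            cases p; exact hp
          rw [hpt, hd] at this
          exact (Option.some.injEq _ _ ▸ this).symm
        by_cases hlt : pvKeyLt (pvKey t s) (pvVal t l).2
        · have hA : pvStepA m item = m.insert t (s, pvKey t s) := by
            simp [pvStepA, ← ht, ← hs, hget, hd, hlt]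
          rw [hA, PySem.Dict.items_insert_of_contains m _ hcm, hBitems, h,
            List.map_map, List.map_map]
          apply List.map_congr_left
          intro p hp
          by_cases hpt : p.1 = t
          · have hpl := hval p hp hpt
            simp [Function.comp, hpt, pvVal_append t l s hlne, hlt]
          · simp [Function.comp, hpt]
        · have hA : pvStepA m item = m := by
            simp [pvStepA, ← ht, ← hs, hget, hd, hlt]
          rw [hA, hBitems, h, List.map_map]
          apply List.map_congr_left
          intro p hp
          by_cases hpt : p.1 = t
          · have hpl := hval p hp hpt
            have : p = (t, l) := by cases p; simp_all
            simp [Function.comp, pvVal_append t l s hlne, hlt, this]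
          · simp [Function.comp, hpt]
      · intro p hp
        rw [hBitems] at hp
        rcases List.mem_map.mp hp with ⟨q, hq, hqe⟩
        by_cases hqt : q.1 = t
        · simp [hqt] at hqe; subst hqe; simp
        · simp [hqt] at hqe; subst hqe; exact hne q hq
      · rw [hBkeys]; exact hnd

-- the whole first loop preserves the simulation
theorem pv_fold_invariant (xs : List (List (String × Int)))
    (m : PySem.Dict Int (Int × (Int × Int × Int))) (d : PySem.Dict Int (List Int))
    (h : m.items = d.items.map (fun p => (p.1, pvVal p.1 p.2)))
    (hne : ∀ p ∈ d.items, p.2 ≠ [])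
    (hnd : d.keys.Nodup) :
    (xs.foldl pvStepA m).items = (xs.foldl pvStepB d).items.map (fun p => (p.1, pvVal p.1 p.2))
    ∧ (xs.foldl pvStepB d).keys.Nodup := by
  induction xs generalizing m d with
  | nil => exact ⟨h, hnd⟩
  | cons item rest ih =>
      obtain ⟨h', hne', hnd'⟩ := pv_step_invariant m d item h hne hnd
      simpa using ih (pvStepA m item) (pvStepB d item) h' hne' hnd'

-- A's second loop over a key-nodup, fresh item list is a plain append of projections
theorem pv_out_fold (ps : List (Int × (Int × (Int × Int × Int)))) (d : PySem.Dict Int Int)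
    (hnd : (ps.map Prod.fst).Nodup)
    (hfresh : ∀ p ∈ ps, d.contains p.1 = false) :
    (ps.foldl (fun d p => d.insert p.1 p.2.1) d).items
      = d.items ++ ps.map (fun p => (p.1, p.2.1)) := by
  induction ps generalizing d with
  | nil => simp
  | cons p rest ih =>
      have hp : d.contains p.1 = false := hfresh p (by simp)
      have hfresh' : ∀ q ∈ rest, (d.insert p.1 p.2.1).contains q.1 = false := by
        intro q hq
        rw [PySem.Dict.contains_insert]
        have hne : q.1 ≠ p.1 := by
          intro he
          have := List.nodup_cons.mp hnd
          exact this.1 (he ▸ List.mem_map.mpr ⟨q, hq, rfl⟩)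
        simp [hne, hfresh q (List.mem_cons_of_mem p hq)]
      have hnd' : (rest.map Prod.fst).Nodup := (List.nodup_cons.mp hnd).2
      simp only [List.foldl_cons]
      rw [ih (d.insert p.1 p.2.1) hnd' hfresh',
        PySem.Dict.items_insert_of_not_contains d _ hp]
      simp

-- ===== VERDICT (by name: the statement is the Claim_ definition above) =====
theorem safe_snap_map_py_spec : Claim_equal_safe_snap_map_py := by
  intro o _
  unfold Spec_safe_snap_map_py safe_snap_map_py safe_snap_map_py_alt
  obtain ⟨hsim, hnd⟩ := pv_fold_invariant (o.getD []) PySem.Dict.empty PySem.Dict.empty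
    rfl (by intro p hp; simp [PySem.Dict.empty] at hp) (by simp [PySem.Dict.keys, PySem.Dict.empty])
  set M := (o.getD []).foldl pvStepA PySem.Dict.empty with hM
  set B := (o.getD []).foldl pvStepB PySem.Dict.empty with hB
  have hMkeys : M.items.map Prod.fst = B.keys := by
    rw [hsim, List.map_map]
    unfold PySem.Dict.keys
    rfl
  rw [pv_out_fold M.items PySem.Dict.empty (hMkeys ▸ hnd)
    (by intro p _; exact PySem.Dict.contains_empty p.1)]
  rw [hsim, List.map_map]
  simp only [PySem.Dict.empty, List.nil_append]
  apply List.map_congr_left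
  intro p _
  cases hmv : pvMinByKey p.1 p.2 <;> simp [Function.comp, pvVal, hmv]
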